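-- pv_equiv track=rewrite | github.com/MrBrantCode/unitest_baseline | mut_generate/mist_train_cf/cf_17178/solution.py | replace_second_smallest_prime
-- ===== SOURCE A (Python) =====
-- import math
--
-- def replace_second_smallest_prime(arr):
--     def is_prime(n):
--         if n <= 1:
--             return False
--         for i in range(2, int(math.sqrt(n)) + 1):
--             if n % i == 0:
--                 return False
--         return True
--
--     prime_sum = 0
--     primes = []
--
--     for num in arr:
--         if is_prime(num):
--             prime_sum += num
--             primes.append(num)
--
--     if len(primes) < 2:
--         return -1
--
--     second_smallest = sorted(primes)[1]
--     arr[arr.index(second_smallest)] = prime_sum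
--
--     return arr
-- ===== SOURCE B (Python) =====
-- import math
--
-- def replace_second_smallest_prime(arr):
--     # One-pass two-minimum scan instead of collecting primes and sorting.
--     # Note: unlike the original, this does not mutate arr; the returned value is the same.
--     def is_prime(n):
--         return n > 1 and all(n % i for i in range(2, math.isqrt(n) + 1))
--
--     prime_sum = 0
--     count = 0
--     min1 = None
--     min2 = None
--     for x in arr:
--         if is_prime(x):
--             prime_sum += x
--             count += 1
--             if min1 is None or x <= min1:
--                 min2 = min1
--                 min1 = x
--             elif min2 is None or x < min2:
--                 min2 = x
--     if count < 2:
--         return -1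
--     out = []
--     replaced = False
--     for x in arr:
--         if not replaced and x == min2:
--             out.append(prime_sum)
--             replaced = True
--         else:
--             out.append(x)
--     return out
-- ===== Notes on version B (the rewrite author's own statement) =====
-- stated objective: alternative
-- what changed: Replaces the collect-primes-list + sorted()[1] + arr.index() selection by a single pass maintaining the running prime sum, a prime count and the two smallest primes (with <= on the first-minimum update so duplicates match sorted order), then a second pass that rebuilds the list replacing the first occurrence; no intermediate primes list, no sort, no .index scan, and arr is not mutated (same return value).
-- outside the precondition, e.g. on replace_second_smallest_prime([1]): A returns -1, B returns -1; on replace_second_smallest_prime([3]): A returns -1, B returns -1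
import Mathlib
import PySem

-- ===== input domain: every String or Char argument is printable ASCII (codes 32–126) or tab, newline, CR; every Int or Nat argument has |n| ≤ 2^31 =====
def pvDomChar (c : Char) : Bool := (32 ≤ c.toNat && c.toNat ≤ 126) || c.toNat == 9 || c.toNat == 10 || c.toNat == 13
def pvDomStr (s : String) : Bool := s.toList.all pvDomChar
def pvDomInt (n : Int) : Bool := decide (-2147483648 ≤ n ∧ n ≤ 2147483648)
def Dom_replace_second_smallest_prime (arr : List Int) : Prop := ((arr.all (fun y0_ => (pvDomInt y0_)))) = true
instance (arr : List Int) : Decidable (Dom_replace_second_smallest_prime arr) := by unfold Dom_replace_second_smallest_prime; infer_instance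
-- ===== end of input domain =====

-- B replaces the collect-primes + sorted()[1] + arr.index() selection of A by a single two-minimum
-- scan and a rebuild pass (objective: alternative). A mutates arr in place; B does not — the
-- equivalence proved here is about the RETURN value only.

-- ===== PORT A =====
-- int(math.sqrt(n)) is exact as Nat.sqrt for the |n| ≤ 2^31 domain (only reached for n ≥ 2)
def isPrimeA (n : Int) : Bool :=
  if n ≤ 1 then false
  else (PySem.List.pyRange 2 ((Nat.sqrt n.toNat : Int) + 1)).all
        (fun i => !(PySem.Int.mod n i == 0))

def replace_second_smallest_prime (arr : List Int) : List Int :=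
  let st := arr.foldl
    (fun (st : Int × List Int) num =>
      if isPrimeA num then (st.1 + num, st.2 ++ [num]) else st) (0, [])
  if st.2.length < 2 then [-1]  -- Python returns the int -1 (not a list of ints) here; excluded by Pre_
  else
    match PySem.List.pyGet? (PySem.List.sorted st.2 (id : Int → Int)) 1 with
    | none => [-1]  -- unreachable: the sorted primes list has length ≥ 2
    | some s =>
      match PySem.List.index? arr s with
      | none => [-1]  -- unreachable: s is an element of arr
      | some i => arr.set i st.1

-- ===== PORT B =====
-- 'n > 1 and all(n % i for i in range(2, math.isqrt(n) + 1))': 'n % i' is truthy iff ≠ 0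
def isPrimeB (n : Int) : Bool :=
  decide (1 < n) && (PySem.List.pyRange 2 ((Nat.sqrt n.toNat : Int) + 1)).all
        (fun i => !(PySem.Int.mod n i == 0))

-- the body of the loop when is_prime(x) holds: update sum, count and the two minima
def primeStepB (st : Int × Int × Option Int × Option Int) (x : Int) :
    Int × Int × Option Int × Option Int :=
  match st with
  | (s, c, m1, m2) =>
    match m1 with
    | none => (s + x, c + 1, some x, m1)
    | some v1 =>
      if x ≤ v1 then (s + x, c + 1, some x, m1)
      else
        match m2 with
        | none => (s + x, c + 1, m1, some x)
        | some v2 =>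
          if x < v2 then (s + x, c + 1, m1, some x) else (s + x, c + 1, m1, m2)

def stepB (st : Int × Int × Option Int × Option Int) (x : Int) :
    Int × Int × Option Int × Option Int :=
  if isPrimeB x then primeStepB st x else st

-- the rebuild loop with its 'replaced' flag, as structural recursion
def replaceFirstB (l : List Int) (tgt v : Int) : List Int :=
  match l with
  | [] => []
  | x :: xs => if x == tgt then v :: xs else x :: replaceFirstB xs tgt v

def replace_second_smallest_prime_alt (arr : List Int) : List Int :=
  let st := arr.foldl stepB (0, 0, none, none)
  if st.2.1 < 2 then [-1]  -- Python returns the int -1 here; excluded by Pre_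
  else
    match st.2.2.2 with
    | none => [-1]  -- unreachable when count ≥ 2
    | some m2 => replaceFirstB arr m2 st.1

-- ===== PRECONDITION & SPEC =====
-- Pre_ excludes exactly the inputs with fewer than two primes, on which the Python A (and B)
-- returns the int -1, which is not a value of the declared List Int return type.
def Pre_replace_second_smallest_prime (arr : List Int) : Prop :=
  2 ≤ (arr.filter (fun n => decide (1 < n ∧ Nat.Prime n.toNat))).length
instance (arr : List Int) : Decidable (Pre_replace_second_smallest_prime arr) := by
  unfold Pre_replace_second_smallest_prime; infer_instance

def pvWitness_replace_second_smallest_prime : List Int := [4, 3, 6, 5]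

def Spec_replace_second_smallest_prime (arr : List Int) (out : List Int) : Prop := out = replace_second_smallest_prime_alt arr
instance (arr : List Int) (out : List Int) : Decidable (Spec_replace_second_smallest_prime arr out) := by unfold Spec_replace_second_smallest_prime; infer_instance

-- ===== CLAIM (what is proved, stated in full; the proofs are below) =====
def Claim_equal_replace_second_smallest_prime : Prop := ∀ (arr : List Int), Dom_replace_second_smallest_prime arr → Pre_replace_second_smallest_prime arr → Spec_replace_second_smallest_prime arr (replace_second_smallest_prime arr)

-- ===== LEMMAS AND PROOFS =====

-- trial division up to the square root is primality (bridges both ports' is_prime to Nat.Prime)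
theorem isPrimeA_eq (n : Int) : isPrimeA n = decide (1 < n ∧ Nat.Prime n.toNat) := by
  by_cases h : n ≤ 1
  · simp [isPrimeA, h]
  · have h : 1 < n := by omega
    simp only [isPrimeA, if_neg (by omega : ¬ n ≤ 1)]
    have h2 : 2 ≤ n.toNat := by omega
    have hn : (n.toNat : Int) = n := by omega
    rw [Bool.eq_iff_iff]
    simp only [List.all_eq_true, Bool.not_eq_eq_eq_not, Bool.not_true, beq_eq_false_iff_ne,
      ne_eq, decide_eq_true_eq]
    constructor
    · intro hall
      refine ⟨h, Nat.prime_def_le_sqrt.mpr ⟨h2, ?_⟩⟩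
      intro m hm hms hdvd
      have hmem : (m : Int) ∈ PySem.List.pyRange 2 ((Nat.sqrt n.toNat : Int) + 1) := by
        rw [PySem.List.mem_pyRange_one]
        constructor <;> [exact_mod_cast hm; exact_mod_cast (by omega : (m:Int) < (Nat.sqrt n.toNat : Int) + 1)]
      apply hall _ hmem
      rw [PySem.Int.mod_eq_zero_iff_dvd]
      rw [← hn]
      exact_mod_cast hdvd
    · rintro ⟨-, hp⟩ i hi hmod
      rw [PySem.List.mem_pyRange_one] at hi
      rw [PySem.Int.mod_eq_zero_iff_dvd] at hmod
      have hdvd : i.toNat ∣ n.toNat := by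
        have : (i.toNat : Int) ∣ (n.toNat : Int) := by rwa [hn, (by omega : (i.toNat : Int) = i)]
        exact_mod_cast this
      exact (Nat.prime_def_le_sqrt.mp hp).2 i.toNat (by omega) (by omega) hdvd

theorem isPrimeB_eq (n : Int) : isPrimeB n = isPrimeA n := by
  by_cases h : n ≤ 1
  · simp [isPrimeA, isPrimeB, h]
  · simp [isPrimeA, isPrimeB, h]
    omega

-- A's collecting loop
theorem foldlA_eq (arr : List Int) (s : Int) (l : List Int) :
    arr.foldl (fun (st : Int × List Int) num =>
      if isPrimeA num then (st.1 + num, st.2 ++ [num]) else st) (s, l)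
      = (s + (arr.filter isPrimeA).sum, l ++ arr.filter isPrimeA) := by
  induction arr generalizing s l with
  | nil => simp
  | cons x xs ih =>
    by_cases hx : isPrimeA x = true
    · simp [hx, ih]
      ring_nf
    · simp [hx, ih]

-- appending one element to Python's stable sort is an ordered insert (values over Int)
theorem sorted_concat (P : List Int) (x : Int) :
    PySem.List.sorted (P ++ [x]) (id : Int → Int)
      = List.orderedInsert (· ≤ ·) x (PySem.List.sorted P (id : Int → Int)) := by
  have hp1 : List.Pairwise (fun a b : Int => a ≤ b) (PySem.List.sorted (P ++ [x]) (id : Int → Int)) := by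
    simpa using PySem.List.sorted_pairwise (P ++ [x]) (id : Int → Int)
  have hp2 : List.Pairwise (fun a b : Int => a ≤ b)
      (List.orderedInsert (· ≤ ·) x (PySem.List.sorted P (id : Int → Int))) :=
    List.Pairwise.orderedInsert x _ (by simpa using PySem.List.sorted_pairwise P (id : Int → Int))
  have hperm : (PySem.List.sorted (P ++ [x]) (id : Int → Int)).Perm
      (List.orderedInsert (· ≤ ·) x (PySem.List.sorted P (id : Int → Int))) := by
    refine (PySem.List.sorted_perm (P ++ [x]) _ false).trans ?_
    refine List.Perm.trans ?_ (List.perm_orderedInsert _ x _).symm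
    exact List.Perm.trans (List.perm_append_comm) (List.Perm.cons x (PySem.List.sorted_perm P _ false).symm)
  exact List.Perm.eq_of_pairwise (fun a b _ _ h1 h2 => by omega) hp1 hp2 hperm

-- the two-minimum fold computes the sum, the count and the first two elements of the sorted list
theorem foldlB_eq (P : List Int) :
    P.foldl primeStepB (0, 0, none, none)
      = (P.sum, (P.length : Int),
         (PySem.List.sorted P (id : Int → Int))[0]?,
         (PySem.List.sorted P (id : Int → Int))[1]?) := by
  induction P using List.reverseRecOn with
  | nil => rfl
  | append_singleton P x ih =>
    rw [List.foldl_concat, ih, sorted_concat]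
    rcases hS : PySem.List.sorted P (id : Int → Int) with _ | ⟨a, rest⟩
    · simp [primeStepB, List.orderedInsert]
    · by_cases h1 : x ≤ a
      · simp [primeStepB, List.orderedInsert, h1]
      · rcases rest with _ | ⟨b, t⟩
        · simp [primeStepB, List.orderedInsert, h1]
        · by_cases h2 : x < b
          · simp [primeStepB, List.orderedInsert, h1, h2, le_of_lt h2]
          · by_cases h3 : x ≤ b
            · have : x = b := by omega
              subst this
              simp [primeStepB, List.orderedInsert, h1]
            · simp [primeStepB, List.orderedInsert, h1, h2, h3]

-- replacing at the first index found equals the rebuild pass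
theorem index_set_eq_replaceFirst (l : List Int) (tgt v : Int) (h : tgt ∈ l) :
    (match PySem.List.index? l tgt with
     | none => ([-1] : List Int)
     | some i => l.set i v) = replaceFirstB l tgt v := by
  induction l with
  | nil => simp at h
  | cons x xs ih =>
    simp only [PySem.List.index?, List.idxOf?] at ih ⊢
    rw [List.findIdx?_cons]
    by_cases hx : x = tgt
    · subst hx
      simp [replaceFirstB]
    · have htl : tgt ∈ xs := by
        rcases List.mem_cons.mp h with h' | h'
        · exact absurd h'.symm hx
        · exact h'
      have hbeq : (x == tgt) = false := by simpa using hx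
      rw [hbeq]
      simp only [Bool.false_eq_true, if_false]
      rcases hi : List.findIdx? (fun y => (y == tgt)) xs with _ | i
      · have := List.findIdx?_eq_none_iff.mp hi tgt htl
        simp at this
      · have := ih htl
        rw [hi] at this
        simp only [Option.map_some]
        simpa [replaceFirstB, hbeq] using this

-- B's loop over arr is the prime-only step over the filtered list
theorem foldlB_filter (arr : List Int) :
    arr.foldl stepB (0, 0, none, none)
      = (arr.filter isPrimeA).foldl primeStepB (0, 0, none, none) := by
  have hf : arr.filter isPrimeA = arr.filter isPrimeB := by
    apply List.filter_congr
    intro n _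
    rw [isPrimeB_eq]
  rw [hf, List.foldl_filter]
  rfl

-- ===== VERDICT (by name: the statement is the Claim_ definition above) =====
theorem replace_second_smallest_prime_spec : Claim_equal_replace_second_smallest_prime := by
  intro arr _ hpre
  unfold Spec_replace_second_smallest_prime
  have hfilter : arr.filter (fun n => decide (1 < n ∧ Nat.Prime n.toNat)) = arr.filter isPrimeA := by
    apply List.filter_congr
    intro n _
    rw [isPrimeA_eq]
  have hlen : 2 ≤ (arr.filter isPrimeA).length := by
    unfold Pre_replace_second_smallest_prime at hpre
    rwa [hfilter] at hpre
  have hSlen : 2 ≤ (PySem.List.sorted (arr.filter isPrimeA) (id : Int → Int)).length := by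
    rwa [List.Perm.length_eq (PySem.List.sorted_perm (arr.filter isPrimeA) (id : Int → Int) false)]
  obtain ⟨a, b, t, hS⟩ : ∃ a b t, PySem.List.sorted (arr.filter isPrimeA) (id : Int → Int) = a :: b :: t := by
    rcases hs : PySem.List.sorted (arr.filter isPrimeA) (id : Int → Int) with _ | ⟨a, _ | ⟨b, t⟩⟩
    · rw [hs] at hSlen; simp at hSlen
    · rw [hs] at hSlen; simp at hSlen
    · exact ⟨a, b, t, rfl⟩
  have hbarr : b ∈ arr := by
    have hbS : b ∈ PySem.List.sorted (arr.filter isPrimeA) (id : Int → Int) := by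
      rw [hS]; simp
    have hbP : b ∈ arr.filter isPrimeA :=
      (PySem.List.sorted_perm (arr.filter isPrimeA) (id : Int → Int) false).mem_iff.mp hbS
    exact List.mem_of_mem_filter hbP
  have hget : PySem.List.pyGet? (PySem.List.sorted (arr.filter isPrimeA) (id : Int → Int)) 1 = some b := by
    have := PySem.List.pyGet?_natCast (PySem.List.sorted (arr.filter isPrimeA) (id : Int → Int)) 1
    rw [(by norm_num : ((1 : Nat) : Int) = 1)] at this
    rw [this, hS]
    rfl
  rw [replace_second_smallest_prime, replace_second_smallest_prime_alt]
  simp only [foldlA_eq arr 0 [], zero_add, List.nil_append, foldlB_filter, foldlB_eq]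
  rw [if_neg (by omega), if_neg (by exact_mod_cast (by omega : ¬ ((arr.filter isPrimeA).length : Int) < 2)), hget, hS]
  simp only []
  exact index_set_eq_replaceFirst arr b (arr.filter isPrimeA).sum hbarr
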